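-- pv_equiv track=rewrite | github.com/jonathanhoss/WetterBot | Wetter.py | skip_first
-- ===== SOURCE A (Python) =====
-- import collections.abc
--
-- def skip_first(it):
--     """
--     Skip the first element of an Iterator or Iterable,
--     like a Generator or a list.
--     This will always return a generator or raise TypeError()
--     in case the argument's type is not compatible
--     """
--     if isinstance(it, collections.abc.Iterator):
--         try:
--             next(it)
--             yield from it
--         except StopIteration:
--             return
--     elif isinstance(it, collections.abc.Iterable):
--         yield from skip_first(it.__iter__())
--     else:
--         raise TypeError(f"You must pass an Iterator or an Iterable to skip_first(), but you passed {it}")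
-- ===== SOURCE B (Python) =====
-- import collections.abc
--
-- def skip_first(it):
--     """
--     Skip the first element of an Iterator or Iterable,
--     like a Generator or a list.
--     This will always return a generator or raise TypeError()
--     in case the argument's type is not compatible
--     """
--     if not isinstance(it, collections.abc.Iterable):
--         raise TypeError(f"You must pass an Iterator or an Iterable to skip_first(), but you passed {it}")
--     for i, x in enumerate(it):
--         if i:
--             yield x
-- ===== Notes on version B (the rewrite author's own statement) =====
-- stated objective: alternative
-- what changed: B never consumes an element with next(): it enumerates the whole stream and yields every item whose index is nonzero (index-filter), instead of A's consume-one-then-stream with a recursive dispatch and a StopIteration guard.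
import Mathlib
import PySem

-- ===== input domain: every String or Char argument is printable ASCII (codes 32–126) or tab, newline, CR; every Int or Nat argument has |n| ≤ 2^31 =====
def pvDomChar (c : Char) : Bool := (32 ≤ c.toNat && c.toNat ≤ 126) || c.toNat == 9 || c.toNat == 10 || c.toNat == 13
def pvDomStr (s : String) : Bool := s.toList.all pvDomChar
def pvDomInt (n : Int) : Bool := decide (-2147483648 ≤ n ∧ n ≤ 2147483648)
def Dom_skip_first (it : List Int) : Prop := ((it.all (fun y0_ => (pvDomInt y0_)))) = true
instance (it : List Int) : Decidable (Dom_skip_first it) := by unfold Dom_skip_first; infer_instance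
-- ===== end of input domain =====

-- B yields every element whose enumerate-index is nonzero, instead of A's consume-one-with-next()
-- then stream-the-rest; same values, objective: alternative (an index-filter instead of a prefix cut).

-- ===== PORT A =====
-- A: a list is Iterable, not an Iterator, so A recurses once on it.__iter__();
-- the recursive call hits the Iterator branch: next() consumes the head (StopIteration on [] → empty),
-- then 'yield from' produces the remaining elements.  One-level recursion is inlined as the helper below.
def skip_first_iter (l : List Int) : List Int :=
  match l with
  | [] => []          -- next() raises StopIteration → generator returns empty
  | _ :: t => t       -- next() consumed the head; yield from the rest
def skip_first (it : List Int) : List Int :=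
  skip_first_iter it  -- 'yield from skip_first(it.__iter__())': recurse on the fresh iterator

-- ===== PORT B =====
-- B: 'for i, x in enumerate(it): if i: yield x' — the generator materialised as the list of
-- yielded elements, accumulated left to right.
def skip_first_alt (it : List Int) : List Int :=
  (PySem.List.enumerate it).foldl
    (fun acc p => if p.1 ≠ 0 then acc ++ [p.2] else acc) []

-- ===== PRECONDITION & SPEC =====
def Spec_skip_first (it : List Int) (out : List Int) : Prop := out = skip_first_alt it
instance (it : List Int) (out : List Int) : Decidable (Spec_skip_first it out) := by unfold Spec_skip_first; infer_instance

-- ===== CLAIM =====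
def Claim_equal_skip_first : Prop := ∀ (it : List Int), Dom_skip_first it → Spec_skip_first it (skip_first it)

-- ===== LEMMAS AND PROOFS =====
-- Once the index is ≥ 1 every element is yielded: the fold appends the whole rest.
theorem fold_enum_pos (t : List Int) : ∀ (s : Int) (acc : List Int), 1 ≤ s →
    (PySem.List.enumerate t s).foldl
      (fun acc p => if p.1 ≠ 0 then acc ++ [p.2] else acc) acc = acc ++ t := by
  induction t with
  | nil => intro s acc _; simp [PySem.List.enumerate_nil]
  | cons x xs ih =>
      intro s acc hs
      rw [PySem.List.enumerate_cons, List.foldl_cons]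
      have hne : s ≠ 0 := by omega
      simp only [hne, if_true, ne_eq, not_false_iff]
      rw [ih (s + 1) (acc ++ [x]) (by omega)]
      simp

-- ===== VERDICT =====
theorem skip_first_spec : Claim_equal_skip_first := by
  intro it _
  unfold Spec_skip_first skip_first skip_first_iter skip_first_alt
  cases it with
  | nil => simp [PySem.List.enumerate_nil]
  | cons x t =>
      rw [PySem.List.enumerate_cons, List.foldl_cons]
      simp only [ne_eq, not_true_eq_false, if_neg, not_false_iff]
      rw [show (0:Int)+1 = 1 from rfl, fold_enum_pos t 1 [] (by omega)]
      simp
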